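-- pv_equiv track=rewrite | github.com/ceo-whyd-it/car-log | carlog_ui/agent/agent.py | _extract_quick_actions
-- ===== SOURCE A (Python) =====
-- from typing import Dict, Any, Optional, List, Tuple, AsyncGenerator
--
-- def _extract_quick_actions(message: str) -> List[str]:
--     """Extract suggested quick actions from response - returns complete prompts."""
--     # Look for suggested actions in the message
--     actions = []
--
--     # Pattern: "You can:" followed by list items
--     if "you can" in message.lower():
--         # Try to extract bullet points
--         lines = message.split("\n")
--         for line in lines:
--             if line.strip().startswith("-") or line.strip().startswith("*"):
--                 action = line.strip().lstrip("-*").strip()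
--                 if len(action) < 80:  # Reasonable action length
--                     actions.append(action)
--
--     # Default contextual actions if none found (complete prompts)
--     if not actions:
--         # Analyze message to provide contextual suggestions
--         msg_lower = message.lower()
--         if "checkpoint" in msg_lower and "created" in msg_lower:
--             actions = [
--                 "Check for gaps in my checkpoints",
--                 "Show me all checkpoints",
--                 "Add another checkpoint"
--             ]
--         elif "vehicle" in msg_lower and "created" in msg_lower:
--             actions = [
--                 "Add a checkpoint for this vehicle",
--                 "List all my vehicles",
--                 "Show vehicle details"
--             ]
--         elif "gap" in msg_lower:
--             actions = [
--                 "Reconstruct trips from the gaps",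
--                 "Add a checkpoint to fill the gap",
--                 "Show me the gap details"
--             ]
--         elif "trip" in msg_lower:
--             actions = [
--                 "Generate a monthly report",
--                 "Show all trips this month",
--                 "Check for more gaps"
--             ]
--         elif "report" in msg_lower:
--             actions = [
--                 "Show trips included in the report",
--                 "Generate report for a different period",
--                 "List all my checkpoints"
--             ]
--         else:
--             actions = [
--                 "Add a new checkpoint",
--                 "Check for gaps in my mileage",
--                 "Generate a monthly report"
--             ]
--
--     return actions[:3]  # Max 3 actions for the 3 buttons
-- ===== SOURCE B (Python) =====
-- from typing import List
--
-- _DEFAULT_ACTIONS = [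
--     ["Check for gaps in my checkpoints", "Show me all checkpoints", "Add another checkpoint"],
--     ["Add a checkpoint for this vehicle", "List all my vehicles", "Show vehicle details"],
--     ["Reconstruct trips from the gaps", "Add a checkpoint to fill the gap", "Show me the gap details"],
--     ["Generate a monthly report", "Show all trips this month", "Check for more gaps"],
--     ["Show trips included in the report", "Generate report for a different period", "List all my checkpoints"],
--     ["Add a new checkpoint", "Check for gaps in my mileage", "Generate a monthly report"],
-- ]
--
-- def _first_bullets(lines: List[str], k: int) -> List[str]:
--     """First (up to) k bullet actions, recursively, stopping as soon as k are found."""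
--     if k == 0 or not lines:
--         return []
--     s = lines[0].strip()
--     if s.startswith(("-", "*")):
--         a = s.lstrip("-*").strip()
--         if len(a) < 80:
--             return [a] + _first_bullets(lines[1:], k - 1)
--     return _first_bullets(lines[1:], k)
--
-- def _extract_quick_actions(message: str) -> List[str]:
--     """Extract suggested quick actions from response - returns complete prompts."""
--     msg_lower = message.lower()
--     actions = _first_bullets(message.split("\n"), 3) if "you can" in msg_lower else []
--     if actions:
--         return actions
--     checks = [
--         "checkpoint" in msg_lower and "created" in msg_lower,
--         "vehicle" in msg_lower and "created" in msg_lower,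
--         "gap" in msg_lower,
--         "trip" in msg_lower,
--         "report" in msg_lower,
--     ]
--     idx = checks.index(True) if True in checks else 5
--     return _DEFAULT_ACTIONS[idx]
-- ===== Notes on version B (the rewrite author's own statement) =====
-- stated objective: alternative
-- what changed: Bullet extraction becomes a bounded recursive scan that stops as soon as 3 actions are found (so no collect-all-then-truncate and no final [:3] at all), and the if/elif default cascade becomes an index computed with checks.index(True) into a table of action lists.
import Mathlib
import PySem

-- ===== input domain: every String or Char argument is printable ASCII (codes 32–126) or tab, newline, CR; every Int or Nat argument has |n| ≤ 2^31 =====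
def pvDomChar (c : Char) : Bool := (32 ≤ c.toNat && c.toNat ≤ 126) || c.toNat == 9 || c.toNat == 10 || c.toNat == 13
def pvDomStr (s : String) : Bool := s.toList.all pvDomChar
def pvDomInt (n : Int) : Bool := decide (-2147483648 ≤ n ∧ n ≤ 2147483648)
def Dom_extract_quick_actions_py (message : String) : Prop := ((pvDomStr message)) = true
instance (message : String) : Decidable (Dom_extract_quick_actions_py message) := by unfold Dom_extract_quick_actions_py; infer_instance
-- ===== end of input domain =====

-- B replaces A's collect-all-then-truncate bullet loop by a bounded recursion that stops at 3
-- actions (no final [:3]), and A's if/elif cascade by an index computed into a table (alternative, same cost).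

-- s.lstrip("-*") is not a PySem primitive; ported by hand (exact: drops leading '-'/'*' chars).
def pvLstripDashStar (s : String) : String := String.ofList (s.toList.dropWhile (fun c => c == '-' || c == '*'))

-- ===== PORT A =====
def extract_quick_actions_py (message : String) : List String :=
  let actions : List String :=
    if PySem.Str.isIn "you can" (PySem.Str.lower message) then
      (((PySem.Str.split? message "\n").getD [])).foldl (fun acc line =>
        if PySem.Str.startswith (PySem.Str.strip line) "-"
           || PySem.Str.startswith (PySem.Str.strip line) "*" then
          let action := PySem.Str.strip (pvLstripDashStar (PySem.Str.strip line))
          if PySem.Str.len action < 80 then acc ++ [action] else acc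
        else acc) []
    else []
  let actions :=
    if actions = [] then
      let m := PySem.Str.lower message
      if PySem.Str.isIn "checkpoint" m && PySem.Str.isIn "created" m then
        ["Check for gaps in my checkpoints", "Show me all checkpoints", "Add another checkpoint"]
      else if PySem.Str.isIn "vehicle" m && PySem.Str.isIn "created" m then
        ["Add a checkpoint for this vehicle", "List all my vehicles", "Show vehicle details"]
      else if PySem.Str.isIn "gap" m then
        ["Reconstruct trips from the gaps", "Add a checkpoint to fill the gap", "Show me the gap details"]
      else if PySem.Str.isIn "trip" m then
        ["Generate a monthly report", "Show all trips this month", "Check for more gaps"]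
      else if PySem.Str.isIn "report" m then
        ["Show trips included in the report", "Generate report for a different period", "List all my checkpoints"]
      else
        ["Add a new checkpoint", "Check for gaps in my mileage", "Generate a monthly report"]
    else actions
  PySem.List.slice actions none (some 3)

-- ===== PORT B =====
-- the table of default action lists, indexed 0..5
def pvDefaults : List (List String) :=
  [ ["Check for gaps in my checkpoints", "Show me all checkpoints", "Add another checkpoint"],
    ["Add a checkpoint for this vehicle", "List all my vehicles", "Show vehicle details"],
    ["Reconstruct trips from the gaps", "Add a checkpoint to fill the gap", "Show me the gap details"],
    ["Generate a monthly report", "Show all trips this month", "Check for more gaps"],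
    ["Show trips included in the report", "Generate report for a different period", "List all my checkpoints"],
    ["Add a new checkpoint", "Check for gaps in my mileage", "Generate a monthly report"] ]

-- _first_bullets(lines, k): first (up to) k bullet actions, stopping as soon as k are found
def pvFirstBullets : List String → Nat → List String
  | _, 0 => []
  | [], _ + 1 => []
  | l :: rest, k + 1 =>
    let s := PySem.Str.strip l
    if PySem.Str.startswith s "-" || PySem.Str.startswith s "*" then
      let a := PySem.Str.strip (pvLstripDashStar s)
      if PySem.Str.len a < 80 then a :: pvFirstBullets rest k
      else pvFirstBullets rest (k + 1)
    else pvFirstBullets rest (k + 1)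

def extract_quick_actions_py_alt (message : String) : List String :=
  let msgLower := PySem.Str.lower message
  let actions : List String :=
    if PySem.Str.isIn "you can" msgLower then
      pvFirstBullets ((PySem.Str.split? message "\n").getD []) 3
    else []
  if actions ≠ [] then actions
  else
    let checks : List Bool :=
      [ PySem.Str.isIn "checkpoint" msgLower && PySem.Str.isIn "created" msgLower,
        PySem.Str.isIn "vehicle" msgLower && PySem.Str.isIn "created" msgLower,
        PySem.Str.isIn "gap" msgLower,
        PySem.Str.isIn "trip" msgLower,
        PySem.Str.isIn "report" msgLower ]
    let idx : Nat := if checks.contains true then (PySem.List.index? checks true).getD 0 else 5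
    pvDefaults.getD idx []

-- ===== PRECONDITION & SPEC =====
def Spec_extract_quick_actions_py (message : String) (out : List String) : Prop := out = extract_quick_actions_py_alt message
instance (message : String) (out : List String) : Decidable (Spec_extract_quick_actions_py message out) := by unfold Spec_extract_quick_actions_py; infer_instance

-- ===== CLAIM =====
def Claim_equal_extract_quick_actions_py : Prop := ∀ (message : String), Dom_extract_quick_actions_py message → Spec_extract_quick_actions_py message (extract_quick_actions_py message)

-- ===== LEMMAS AND PROOFS =====

-- the full bullet list, as a staged comprehension (proof-only abbreviation)
def pvBullets (lines : List String) : List String :=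
  ((lines.map PySem.Str.strip).filterMap (fun s =>
      if PySem.Str.startswith s "-" || PySem.Str.startswith s "*" then
        some (PySem.Str.strip (pvLstripDashStar s))
      else none)).filter (fun a => PySem.Str.len a < 80)

-- A's accumulator loop builds exactly the full bullet list
theorem pv_loop_eq (lines : List String) (acc : List String) :
    lines.foldl (fun acc line =>
        if PySem.Str.startswith (PySem.Str.strip line) "-"
           || PySem.Str.startswith (PySem.Str.strip line) "*" then
          let action := PySem.Str.strip (pvLstripDashStar (PySem.Str.strip line))
          if PySem.Str.len action < 80 then acc ++ [action] else acc
        else acc) acc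
    = acc ++ pvBullets lines := by
  induction lines generalizing acc with
  | nil => simp only [List.foldl_nil, pvBullets, List.map_nil, List.filterMap_nil,
      List.filter_nil, List.append_nil]
  | cons l t ih =>
    simp only [List.foldl_cons, pvBullets, List.map_cons, List.filterMap_cons]
    by_cases h : (PySem.Str.startswith (PySem.Str.strip l) "-"
        || PySem.Str.startswith (PySem.Str.strip l) "*") = true
    · simp only [h, if_true]
      by_cases h2 : PySem.Str.len (PySem.Str.strip (pvLstripDashStar (PySem.Str.strip l))) < 80
      · simp only [h2, if_true, ih, pvBullets, List.filter_cons, decide_eq_true_eq,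
          List.append_assoc, List.singleton_append]
      · simp only [h2, if_false, ih, pvBullets, List.filter_cons, decide_eq_true_eq]
    · simp only [Bool.not_eq_true] at h
      simp only [h, Bool.false_eq_true, if_false, ih, pvBullets]

-- B's bounded recursion is the take-k prefix of the full bullet list
theorem pv_first_eq (lines : List String) (k : Nat) :
    pvFirstBullets lines k = (pvBullets lines).take k := by
  induction lines generalizing k with
  | nil => cases k <;> simp [pvFirstBullets, pvBullets]
  | cons l t ih =>
    cases k with
    | zero => simp [pvFirstBullets]
    | succ k =>
      simp only [pvFirstBullets, pvBullets, List.map_cons, List.filterMap_cons]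
      by_cases h : (PySem.Str.startswith (PySem.Str.strip l) "-"
          || PySem.Str.startswith (PySem.Str.strip l) "*") = true
      · simp only [h, if_true]
        by_cases h2 : PySem.Str.len (PySem.Str.strip (pvLstripDashStar (PySem.Str.strip l))) < 80
        · simp only [h2, if_true, List.filter_cons, decide_eq_true_eq, List.take_succ_cons,
            ih, pvBullets]
        · simp only [h2, if_false, List.filter_cons, decide_eq_true_eq, ih, pvBullets]
      · simp only [Bool.not_eq_true] at h
        simp only [h, Bool.false_eq_true, if_false, ih, pvBullets]

-- A's if/elif cascade (already truncated) equals B's table lookup, for all keyword outcomes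
theorem pv_table_eq (a b v g t r : Bool) :
    PySem.List.slice
      (if a && b then ["Check for gaps in my checkpoints", "Show me all checkpoints", "Add another checkpoint"]
       else if v && b then ["Add a checkpoint for this vehicle", "List all my vehicles", "Show vehicle details"]
       else if g then ["Reconstruct trips from the gaps", "Add a checkpoint to fill the gap", "Show me the gap details"]
       else if t then ["Generate a monthly report", "Show all trips this month", "Check for more gaps"]
       else if r then ["Show trips included in the report", "Generate report for a different period", "List all my checkpoints"]
       else ["Add a new checkpoint", "Check for gaps in my mileage", "Generate a monthly report"])
      none (some 3)
    = pvDefaults.getD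
        (if [a && b, v && b, g, t, r].contains true then
           (PySem.List.index? [a && b, v && b, g, t, r] true).getD 0
         else 5) [] := by
  cases a <;> cases b <;> cases v <;> cases g <;> cases t <;> cases r <;> rfl

-- ===== VERDICT =====
theorem extract_quick_actions_py_spec : Claim_equal_extract_quick_actions_py := by
  intro message _
  show extract_quick_actions_py message = extract_quick_actions_py_alt message
  unfold extract_quick_actions_py extract_quick_actions_py_alt
  rw [pv_loop_eq, List.nil_append, pv_first_eq]
  by_cases hc : PySem.Str.isIn "you can" (PySem.Str.lower message) = true
  · simp only [hc, if_true]
    by_cases hb : pvBullets ((PySem.Str.split? message "\n").getD []) = []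
    · simp only [hb, List.take_nil, if_true, ne_eq, not_true_eq_false, if_false,
        pv_table_eq]
    · have ht : (pvBullets ((PySem.Str.split? message "\n").getD [])).take 3 ≠ [] := by
        simpa [List.take_eq_nil_iff] using hb
      simp only [hb, if_false, ne_eq, ht, not_false_eq_true, if_true]
      exact PySem.List.slice_to _ (by norm_num)
  · simp only [Bool.not_eq_true] at hc
    simp only [hc, Bool.false_eq_true, if_false, if_true, ne_eq, not_true_eq_false,
      pv_table_eq]
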